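-- pv_equiv track=rewrite | github.com/gve-sw/gve_devnet_sonicwall_to_mx_acls | sonicwall_to_mx.py | combine_like_services
-- ===== SOURCE A (Python) =====
-- def combine_like_services(service_objs):
--     """
--     Combine like protocol elements into comma separated list (not including ranges)
--     :param service_objs: list of service objects
--     :return:
--     """
--     # Combine like protocol elements into comma separated lists (ranges are kept separate)
--     result = []
--     tcp_list = []
--     udp_list = []
--     icmp_list = []
--
--     for service in service_objs:
--         # Maintain range objects
--         if '-' in service[1]:
--             result.append(service)
--         # Break down individual objects to build comma separated list
--         else:
--             if service[0] == 'TCP':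
--                 # Handle nested service objects, service objects
--                 if service[1] not in tcp_list:
--                     tcp_list.append(service[1])
--                 else:
--                     continue
--             elif service[0] == 'UDP':
--                 # Handle nested service objects, service objects
--                 if service[1] not in udp_list:
--                     udp_list.append(service[1])
--                 else:
--                     continue
--             elif service[0] == 'ICMP' or service[0] == 'ICMPV6':
--                 icmp_list = [service[0], 'N/A']
--
--     # Combine joined lists back into results
--     if len(tcp_list) > 0:
--         tcp_list = ','.join(tcp_list)
--         result.append(['TCP', tcp_list])
--
--     if len(udp_list) > 0:
--         udp_list = ','.join(udp_list)
--         result.append(['UDP', udp_list])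
--
--     if len(icmp_list) > 0:
--         result.append(icmp_list)
--
--     return result
-- ===== SOURCE B (Python) =====
-- def combine_like_services(service_objs):
--     """
--     Combine like protocol elements into comma separated list (not including ranges)
--     :param service_objs: list of service objects
--     :return:
--     """
--     # Partition: ranges first (input order), the rest grouped by protocol.
--     result = [s for s in service_objs if '-' in s[1]]
--     singles = [s for s in service_objs if '-' not in s[1]]
--     tcp = list(dict.fromkeys(s[1] for s in singles if s[0] == 'TCP'))
--     udp = list(dict.fromkeys(s[1] for s in singles if s[0] == 'UDP'))
--     icmp = [s[0] for s in singles if s[0] in ('ICMP', 'ICMPV6')]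
--     if tcp:
--         result.append(['TCP', ','.join(tcp)])
--     if udp:
--         result.append(['UDP', ','.join(udp)])
--     if icmp:
--         result.append([icmp[-1], 'N/A'])
--     return result
-- ===== Notes on version B (the rewrite author's own statement) =====
-- stated objective: alternative
-- what changed: Replaces the single stateful loop with four accumulators by a partition-and-group decomposition: comprehensions split ranges from singles, dict.fromkeys dedups the TCP/UDP values, and the last ICMP label is read off a mapped list.
import Mathlib
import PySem

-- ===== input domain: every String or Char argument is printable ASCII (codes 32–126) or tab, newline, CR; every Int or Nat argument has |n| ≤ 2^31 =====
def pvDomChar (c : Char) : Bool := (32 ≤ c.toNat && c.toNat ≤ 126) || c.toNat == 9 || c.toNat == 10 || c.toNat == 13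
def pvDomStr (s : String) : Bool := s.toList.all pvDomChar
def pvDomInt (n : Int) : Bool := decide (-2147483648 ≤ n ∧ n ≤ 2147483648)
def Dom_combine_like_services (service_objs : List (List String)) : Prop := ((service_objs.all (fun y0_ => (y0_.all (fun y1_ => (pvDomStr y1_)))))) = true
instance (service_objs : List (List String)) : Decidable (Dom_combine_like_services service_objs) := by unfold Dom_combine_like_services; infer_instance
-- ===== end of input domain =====

-- B replaces A's single stateful loop by a partition-and-group decomposition (filters + ordered dedup + last label); objective: alternative structure, same results.
-- Pre_ excludes inputs where some service object has fewer than two fields: there Python A (and B) raise IndexError on service[1].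


-- ===== PORT A =====
-- one loop step of A: state = (result, tcp_list, udp_list, icmp_list)
def pvStepA (st : List (List String) × List String × List String × List String)
    (service : List String) : List (List String) × List String × List String × List String :=
  match service with
  | p :: v :: _ =>
    if PySem.Str.isIn "-" v then (st.1 ++ [service], st.2.1, st.2.2.1, st.2.2.2)
    else if p == "TCP" then
      if !(st.2.1.contains v) then (st.1, st.2.1 ++ [v], st.2.2.1, st.2.2.2) else st
    else if p == "UDP" then
      if !(st.2.2.1.contains v) then (st.1, st.2.1, st.2.2.1 ++ [v], st.2.2.2) else st
    else if p == "ICMP" || p == "ICMPV6" then (st.1, st.2.1, st.2.2.1, [p, "N/A"])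
    else st
  | _ => st  -- Python raises IndexError here; excluded by Pre_

def combine_like_services (service_objs : List (List String)) : List (List String) :=
  let st := service_objs.foldl pvStepA ([], [], [], [])
  let r1 := if st.2.1.length > 0 then st.1 ++ [["TCP", PySem.Str.join "," st.2.1]] else st.1
  let r2 := if st.2.2.1.length > 0 then r1 ++ [["UDP", PySem.Str.join "," st.2.2.1]] else r1
  if st.2.2.2.length > 0 then r2 ++ [st.2.2.2] else r2

-- ===== PORT B =====
-- field accessors (s[0], s[1]; Pre_ guarantees both exist)
def pvProto (s : List String) : String := s.headD ""
def pvVal (s : List String) : String := s.getD 1 ""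
-- the comprehensions of Source B
def pvRanges (objs : List (List String)) : List (List String) :=
  objs.filter (fun s => PySem.Str.isIn "-" (pvVal s))
def pvSingles (objs : List (List String)) : List (List String) :=
  objs.filter (fun s => !PySem.Str.isIn "-" (pvVal s))
def pvTcpVals (objs : List (List String)) : List String :=
  ((pvSingles objs).filter (fun s => pvProto s == "TCP")).map pvVal
def pvUdpVals (objs : List (List String)) : List String :=
  ((pvSingles objs).filter (fun s => pvProto s == "UDP")).map pvVal
def pvIcmpLbls (objs : List (List String)) : List String :=
  ((pvSingles objs).filter (fun s => pvProto s == "ICMP" || pvProto s == "ICMPV6")).map pvProto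

def combine_like_services_alt (service_objs : List (List String)) : List (List String) :=
  let tcp := PySem.List.dedup (pvTcpVals service_objs)   -- list(dict.fromkeys(...))
  let udp := PySem.List.dedup (pvUdpVals service_objs)
  let icmp := pvIcmpLbls service_objs
  let r := pvRanges service_objs
      ++ (if tcp.isEmpty then [] else [["TCP", PySem.Str.join "," tcp]])
      ++ (if udp.isEmpty then [] else [["UDP", PySem.Str.join "," udp]])
  match icmp.getLast? with   -- icmp[-1] if icmp else nothing
  | some l => r ++ [[l, "N/A"]]
  | none => r

-- ===== PRECONDITION & SPEC =====
-- Pre_ excludes exactly the inputs where a service object has fewer than two fields: Python A raises IndexError on service[1] there.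
def Pre_combine_like_services (service_objs : List (List String)) : Prop :=
  ∀ s ∈ service_objs, 2 ≤ s.length
instance (service_objs : List (List String)) : Decidable (Pre_combine_like_services service_objs) := by unfold Pre_combine_like_services; infer_instance
def pvWitness_combine_like_services : List (List String) :=
  [["TCP", "80"], ["UDP", "53"], ["ICMP", "x"], ["TCP", "80-90"], ["TCP", "443"]]

def Spec_combine_like_services (service_objs : List (List String)) (out : List (List String)) : Prop := out = combine_like_services_alt service_objs
instance (service_objs : List (List String)) (out : List (List String)) : Decidable (Spec_combine_like_services service_objs out) := by unfold Spec_combine_like_services; infer_instance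

-- ===== CLAIM (what is proved, stated in full; the proofs are below) =====
def Claim_equal_combine_like_services : Prop := ∀ (service_objs : List (List String)), Dom_combine_like_services service_objs → Pre_combine_like_services service_objs → Spec_combine_like_services service_objs (combine_like_services service_objs)

-- ===== LEMMAS AND PROOFS =====

-- A's loop, started in any state, computed componentwise by B's comprehensions
lemma pvFold_spec (objs : List (List String))
    (h : ∀ s ∈ objs, 2 ≤ s.length)
    (r : List (List String)) (t u i : List String) :
    objs.foldl pvStepA (r, t, u, i) =
      (r ++ pvRanges objs,
       (pvTcpVals objs).foldl PySem.Set.add t,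
       (pvUdpVals objs).foldl PySem.Set.add u,
       (pvIcmpLbls objs).foldl (fun _ l => [l, "N/A"]) i) := by
  induction objs generalizing r t u i with
  | nil => simp [pvRanges, pvSingles, pvTcpVals, pvUdpVals, pvIcmpLbls]
  | cons s rest ih =>
    have hs : 2 ≤ s.length := h s (by simp)
    have hrest : ∀ x ∈ rest, 2 ≤ x.length := fun x hx => h x (by simp [hx])
    obtain ⟨p, v, tl, rfl⟩ : ∃ p v tl, s = p :: v :: tl := by
      match s, hs with
      | p :: v :: tl, _ => exact ⟨p, v, tl, rfl⟩
    simp only [List.foldl_cons, pvStepA]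
    by_cases hdash : PySem.Chars.isIn ['-'] v.toList = true
    · simp [hdash, ih hrest, pvRanges, pvSingles, pvTcpVals, pvUdpVals, pvIcmpLbls,
        pvVal, List.append_assoc]
    · by_cases htcp : p = "TCP"
      · subst htcp
        by_cases hc : v ∈ t <;>
          simp [hdash, hc, ih hrest, pvRanges, pvSingles, pvTcpVals, pvUdpVals,
            pvIcmpLbls, pvVal, pvProto]
      · by_cases hudp : p = "UDP"
        · subst hudp
          by_cases hc : v ∈ u <;>
            simp [hdash, hc, ih hrest, pvRanges, pvSingles, pvTcpVals, pvUdpVals,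
              pvIcmpLbls, pvVal, pvProto]
        · by_cases hicmp : p = "ICMP" ∨ p = "ICMPV6"
          · rcases hicmp with rfl | rfl <;>
              simp [hdash, ih hrest, pvRanges, pvSingles, pvTcpVals,
                pvUdpVals, pvIcmpLbls, pvVal, pvProto]
          · push Not at hicmp
            simp [hdash, htcp, hudp, hicmp.1, hicmp.2, ih hrest, pvRanges, pvSingles,
              pvTcpVals, pvUdpVals, pvIcmpLbls, pvVal, pvProto]

-- A's icmp accumulator keeps only the last label
lemma pvIcmpFold (labels : List String) (i : List String) :
    labels.foldl (fun _ l => [l, "N/A"]) i =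
      (match labels.getLast? with
       | some l => [l, "N/A"]
       | none => i) := by
  induction labels generalizing i with
  | nil => rfl
  | cons l ls ih =>
    rw [List.foldl_cons, ih]
    cases ls with
    | nil => rfl
    | cons a b =>
      rw [List.getLast?_cons_cons]
      cases hlast : (a :: b).getLast? with
      | some l' => rfl
      | none => simp at hlast

-- ===== VERDICT (by name: the statement is the Claim_ definition above) =====
theorem combine_like_services_spec : Claim_equal_combine_like_services := by
  intro objs _ hpre
  unfold Spec_combine_like_services combine_like_services combine_like_services_alt
  rw [pvFold_spec objs hpre]
  simp only [PySem.List.dedup_eq_ofList, PySem.Set.ofList_eq_foldl, pvIcmpFold]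
  cases htcp : (pvTcpVals objs).foldl PySem.Set.add [] with
  | nil =>
    cases hudp : (pvUdpVals objs).foldl PySem.Set.add [] with
    | nil =>
      cases (pvIcmpLbls objs).getLast? <;> simp
    | cons a b =>
      cases (pvIcmpLbls objs).getLast? <;> simp [List.append_assoc]
  | cons a b =>
    cases hudp : (pvUdpVals objs).foldl PySem.Set.add [] with
    | nil =>
      cases (pvIcmpLbls objs).getLast? <;> simp [List.append_assoc]
    | cons c d =>
      cases (pvIcmpLbls objs).getLast? <;> simp [List.append_assoc]
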